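-- pv_equiv track=rewrite | github.com/OnePantheon/Ateliers-pygame | projet3.py | corrige_rep
-- ===== SOURCE A (Python) =====
-- def corrige_rep(chain):
--     #Init
--     new = ""
--     i = 0
--
--     #Process
--     while i < len(chain):
--         if i == 0 or chain[i] != chain[i-1]:#Single letter
--             new += chain[i]
--         else:
--             count = 1
--             while i < len(chain) - 1 and chain[i] == chain[i+1]:#Repetition
--                 i += 1
--                 count += 1
--                 if count <= 2:
--                     new += chain[i]
--         i += 1
--
--     return new
-- ===== SOURCE B (Python) =====
-- from itertools import groupby
--
-- def corrige_rep(chain):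
--     # One run at a time: A emits one copy of the character for runs of length
--     # 1 or 2 and two copies for runs of length 3 or more.
--     return "".join(c * (2 if sum(1 for _ in g) >= 3 else 1) for c, g in groupby(chain))
-- ===== Notes on version B (the rewrite author's own statement) =====
-- stated objective: idiomatic
-- what changed: Replaces A's manual index scan with a nested inner while over chain[i]/chain[i+1] by a single itertools.groupby pass over maximal runs, emitting per run the count A emits (one copy for runs of length 1-2, two for length >= 3) and joining once.
import Mathlib
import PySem

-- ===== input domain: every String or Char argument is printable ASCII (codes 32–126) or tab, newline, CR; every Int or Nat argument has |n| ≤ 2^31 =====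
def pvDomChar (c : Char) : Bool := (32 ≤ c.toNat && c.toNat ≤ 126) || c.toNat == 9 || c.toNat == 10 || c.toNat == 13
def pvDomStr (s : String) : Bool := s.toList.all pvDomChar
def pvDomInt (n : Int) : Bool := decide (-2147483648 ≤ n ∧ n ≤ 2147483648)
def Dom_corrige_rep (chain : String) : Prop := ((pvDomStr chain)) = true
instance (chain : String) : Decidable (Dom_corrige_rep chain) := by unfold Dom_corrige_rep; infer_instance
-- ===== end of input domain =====

-- B replaces A's index-scanning while loops by a single pass over maximal runs
-- (itertools.groupby), emitting per run exactly what A emits: one copy of the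
-- character for runs of length 1 or 2, two copies for runs of length ≥ 3.

-- ===== PORT A =====
-- inner `while` of A: walks to the end of the current repetition, appending the
-- character while count ≤ 2; returns the updated (i, new).  Indices are always
-- in range when A reads chain[i]/chain[i+1], so List.getD is exact here.
-- `fuel` only makes the loop total: with fuel ≥ s.length the 0-case is never hit.
def pvInnerA (s : List Char) (fuel i count : Nat) (new : List Char) : Nat × List Char :=
  match fuel with
  | 0 => (i, new)
  | fuel + 1 =>
      if i < s.length - 1 ∧ s.getD i default = s.getD (i + 1) default then
        pvInnerA s fuel (i + 1) (count + 1)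
          (if count + 1 ≤ 2 then new ++ [s.getD (i + 1) default] else new)
      else (i, new)

-- outer `while` of A (fuel likewise: each iteration increases i, so s.length suffices)
def pvOuterA (s : List Char) (fuel i : Nat) (new : List Char) : List Char :=
  match fuel with
  | 0 => new
  | fuel + 1 =>
      if i < s.length then
        if i = 0 ∨ s.getD i default ≠ s.getD (i - 1) default then
          pvOuterA s fuel (i + 1) (new ++ [s.getD i default])
        else
          let r := pvInnerA s s.length i 1 new
          pvOuterA s fuel (r.1 + 1) r.2
      else new

def corrige_rep (chain : String) : String :=
  String.mk (pvOuterA chain.toList chain.toList.length 0 [])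

-- ===== PORT B =====
-- groupby(chain): split into maximal runs, left to right
def pvRuns (s : List Char) : List (Char × Nat) :=
  match s with
  | [] => []
  | c :: rest =>
      (c, 1 + (rest.takeWhile (fun x => x == c)).length) ::
        pvRuns (rest.dropWhile (fun x => x == c))
termination_by s.length
decreasing_by
  have := List.length_dropWhile_le (fun x => x == c) rest
  simp only [List.length_cons]; omega

def corrige_rep_alt (chain : String) : String :=
  String.mk
    (((pvRuns chain.toList).map
        (fun p => List.replicate (if 3 ≤ p.2 then 2 else 1) p.1)).flatten)

-- ===== PRECONDITION & SPEC =====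
def Spec_corrige_rep (chain : String) (out : String) : Prop := out = corrige_rep_alt chain
instance (chain : String) (out : String) : Decidable (Spec_corrige_rep chain out) := by unfold Spec_corrige_rep; infer_instance

-- ===== CLAIM (what is proved, stated in full; the proofs are below) =====
def Claim_equal_corrige_rep : Prop := ∀ (chain : String), Dom_corrige_rep chain → Spec_corrige_rep chain (corrige_rep chain)

-- ===== LEMMAS AND PROOFS =====

def pvContrib (rs : List (Char × Nat)) : List Char :=
  (rs.map (fun p => List.replicate (if 3 ≤ p.2 then 2 else 1) p.1)).flatten

theorem pv_dropWhile_eq_drop {α : Type} (p : α → Bool) (l : List α) :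
    l.dropWhile p = l.drop (l.takeWhile p).length := by
  induction l with
  | nil => rfl
  | cons a l ih =>
      by_cases h : p a = true
      · simp [List.takeWhile_cons, h, ih]
      · simp [List.takeWhile_cons, h]

-- a positive takeWhile count at position j means s[j] = c and one less from j+1
theorem pv_tw_succ (s : List Char) (j r : Nat) (c : Char)
    (h : ((s.drop j).takeWhile (fun x => x == c)).length = r + 1) :
    j < s.length ∧ s.getD j default = c ∧
      ((s.drop (j + 1)).takeWhile (fun x => x == c)).length = r := by
  by_cases hj : j < s.length
  · have hd := List.drop_eq_getElem_cons (l := s) (i := j) hj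
    rw [hd, List.takeWhile_cons] at h
    by_cases he : s[j] = c
    · refine ⟨hj, ?_, ?_⟩
      · rw [List.getD_eq_getElem s default hj]; exact he
      · simp [he] at h; omega
    · simp [he] at h
  · rw [List.drop_eq_nil_of_le (by omega)] at h; simp at h

theorem pv_tw_zero (s : List Char) (j : Nat) (c : Char) (hj : j < s.length)
    (h : ((s.drop j).takeWhile (fun x => x == c)).length = 0) :
    s.getD j default ≠ c := by
  have hd := List.drop_eq_getElem_cons (l := s) (i := j) hj
  rw [hd, List.takeWhile_cons] at h
  by_cases he : s[j] = c
  · simp [he] at h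
  · rw [List.getD_eq_getElem s default hj]; exact he

-- inner loop with count ≥ 2: walks over the r remaining copies of c, appends nothing
theorem pv_innerA_ge2 (s : List Char) (c : Char) :
    ∀ (r fuel i count : Nat) (new : List Char), r ≤ fuel → 2 ≤ count → i < s.length →
      s.getD i default = c →
      ((s.drop (i + 1)).takeWhile (fun x => x == c)).length = r →
      pvInnerA s fuel i count new = (i + r, new) ∧ s.getD (i + r) default = c ∧
        ((s.drop (i + r + 1)).takeWhile (fun x => x == c)).length = 0 := by
  intro r
  induction r with
  | zero =>
      intro fuel i count new _ _ hi hc htw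
      have hres : pvInnerA s fuel i count new = (i, new) := by
        cases fuel with
        | zero => rfl
        | succ fuel =>
            rw [pvInnerA, if_neg]
            rintro ⟨h1, h2⟩
            exact pv_tw_zero s (i + 1) c (by omega) htw (h2 ▸ hc)
      exact ⟨hres, by simpa using hc, by simpa using htw⟩
  | succ r ih =>
      intro fuel i count new hfuel hcount hi hc htw
      obtain ⟨h1, h2, h3⟩ := pv_tw_succ s (i + 1) r c htw
      obtain ⟨fuel, rfl⟩ : ∃ f, fuel = f + 1 := ⟨fuel - 1, by omega⟩
      rw [pvInnerA, if_pos ⟨by omega, by rw [hc, h2]⟩,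
        if_neg (show ¬ (count + 1 ≤ 2) by omega)]
      have := ih fuel (i + 1) (count + 1) new (by omega) (by omega) h1 h2 h3
      have harith : i + 1 + r = i + (r + 1) := by omega
      rw [harith] at this
      exact this

-- inner loop entered with count = 1 (A's else branch): appends one extra copy
-- of c iff the repetition continues (r ≥ 1 more copies ahead)
theorem pv_innerA_one (s : List Char) (c : Char) (r fuel i : Nat) (new : List Char)
    (hfuel : r ≤ fuel) (hi : i < s.length) (hc : s.getD i default = c)
    (htw : ((s.drop (i + 1)).takeWhile (fun x => x == c)).length = r) :
    pvInnerA s fuel i 1 new = (i + r, new ++ if 1 ≤ r then [c] else []) ∧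
      s.getD (i + r) default = c ∧
      ((s.drop (i + r + 1)).takeWhile (fun x => x == c)).length = 0 := by
  cases r with
  | zero =>
      have hres : pvInnerA s fuel i 1 new = (i, new) := by
        cases fuel with
        | zero => rfl
        | succ fuel =>
            rw [pvInnerA, if_neg]
            rintro ⟨h1, h2⟩
            exact pv_tw_zero s (i + 1) c (by omega) htw (h2 ▸ hc)
      exact ⟨by simpa using hres, by simpa using hc, by simpa using htw⟩
  | succ r =>
      obtain ⟨h1, h2, h3⟩ := pv_tw_succ s (i + 1) r c htw
      obtain ⟨fuel, rfl⟩ : ∃ f, fuel = f + 1 := ⟨fuel - 1, by omega⟩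
      rw [pvInnerA, if_pos ⟨by omega, by rw [hc, h2]⟩,
        if_pos (show (1 : Nat) + 1 ≤ 2 by omega), show (1 : Nat) + 1 = 2 from rfl]
      have := pv_innerA_ge2 s c r fuel (i + 1) 2 (new ++ [s.getD (i + 1) default])
        (by omega) (le_refl 2) h1 h2 h3
      have harith : i + 1 + r = i + (r + 1) := by omega
      rw [harith] at this
      obtain ⟨e1, e2, e3⟩ := this
      refine ⟨?_, e2, e3⟩
      rw [e1, h2, if_pos (show 1 ≤ r + 1 by omega)]

-- outer loop, started at the first index of a run with enough fuel, produces
-- B's per-run output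
theorem pv_outer_runs (s : List Char) :
    ∀ (fuel i : Nat) (new : List Char), s.length ≤ fuel + i →
      (i < s.length → i = 0 ∨ s.getD i default ≠ s.getD (i - 1) default) →
      pvOuterA s fuel i new = new ++ pvContrib (pvRuns (s.drop i)) := by
  intro fuel
  induction fuel using Nat.strong_induction_on with
  | _ fuel ih =>
  intro i new hn hfresh
  match fuel, hn, ih with
  | 0, hn, ih =>
      rw [pvOuterA, List.drop_eq_nil_of_le (by omega)]
      simp [pvRuns, pvContrib]
  | Nat.succ fuel, hn, ih =>
      by_cases hi : i < s.length
      · set c := s.getD i default with hc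
        set r := ((s.drop (i + 1)).takeWhile (fun x => x == c)).length with hr
        have hrle : r ≤ s.length := by
          rw [hr]
          exact le_trans (List.Sublist.length_le (List.takeWhile_sublist _))
            (by rw [List.length_drop]; omega)
        -- decompose pvRuns (s.drop i)
        have hdi : s.drop i = s[i] :: s.drop (i + 1) := List.drop_eq_getElem_cons hi
        have hgi : s[i] = c := by rw [hc, List.getD_eq_getElem s default hi]
        have hruns : pvRuns (s.drop i) = (c, 1 + r) :: pvRuns (s.drop (i + r + 1)) := by
          rw [hdi, hgi, pvRuns, pv_dropWhile_eq_drop, ← hr, List.drop_drop,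
            show i + 1 + r = i + r + 1 from by omega]
        rw [pvOuterA, if_pos hi, if_pos (hfresh hi), ← hc]
        rcases Nat.eq_zero_or_pos r with h0 | hpos
        · -- run of length 1 from i
          have := ih fuel (by omega) (i + 1) (new ++ [c]) (by omega) (by
            intro h1
            right
            simp only [Nat.add_sub_cancel]
            rw [← hc]
            exact pv_tw_zero s (i + 1) c h1 (by omega))
          rw [this, hruns]
          simp [pvContrib, h0, List.append_assoc]
        · -- run of length 1 + r ≥ 2 from i
          obtain ⟨h1, h2, h3⟩ := pv_tw_succ s (i + 1) (r - 1) c (by rw [← hr]; omega)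
          obtain ⟨f, rfl⟩ : ∃ f, fuel = f + 1 := ⟨fuel - 1, by omega⟩
          rw [pvOuterA, if_pos h1, if_neg (by
            push_neg
            refine ⟨by omega, ?_⟩
            simp only [Nat.add_sub_cancel]
            rw [h2, ← hc])]
          obtain ⟨he1, he2, he3⟩ :=
            pv_innerA_one s c (r - 1) s.length (i + 1) (new ++ [c]) (by omega) h1 h2 h3
          simp only [he1]
          have harith : i + 1 + (r - 1) = i + r := by omega
          rw [harith] at he2 he3 ⊢
          have := ih f (by omega) (i + r + 1) ((new ++ [c]) ++ if 1 ≤ r - 1 then [c] else [])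
            (by omega) (by
              intro h4
              right
              simp only [Nat.add_sub_cancel]
              rw [he2]
              exact pv_tw_zero s (i + r + 1) c h4 he3)
          rw [this, hruns]
          simp only [pvContrib, List.map_cons, List.flatten_cons]
          have hrep : List.replicate (if 3 ≤ 1 + r then 2 else 1) c
              = [c] ++ (if 1 ≤ r - 1 then [c] else []) := by
            rcases Nat.lt_or_ge r 2 with hlt | hge
            · have : r = 1 := by omega
              simp [this]
            · rw [if_pos (by omega), if_pos (by omega)]
              rfl
          rw [hrep]
          simp [List.append_assoc]
      · rw [pvOuterA, if_neg hi, List.drop_eq_nil_of_le (by omega)]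
        simp [pvRuns, pvContrib]

-- ===== VERDICT (by name: the statement is the Claim_ definition above) =====
theorem corrige_rep_spec : Claim_equal_corrige_rep := by
  intro chain _
  unfold Spec_corrige_rep corrige_rep corrige_rep_alt
  have := pv_outer_runs chain.toList chain.toList.length 0 []
    (by omega) (fun _ => Or.inl rfl)
  rw [this]
  simp [pvContrib]
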